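-- pv_equiv track=rewrite | github.com/alextichonov/alextichonov | main.py | circular_array
-- ===== SOURCE A (Python) =====
-- def circular_array(n, m):
--
--     array = list(range(1, n+1))
--
--     current_index = 0
--     path = []
--     while array[current_index] not in path:
--        path.append(array[current_index])
--        current_index = (current_index + m - 1) % n
--
--     return path
-- ===== SOURCE B (Python) =====
-- def circular_array(n, m):
--     # Number-theoretic closed form: the walk visits index t*(m-1) mod n at step t,
--     # and the cycle length is n // gcd(n, m-1); no repeat detection needed.
--     step = (m - 1) % n
--     g, r = n, step
--     while r:
--         g, r = r, g % r
--     return [t * step % n + 1 for t in range(n // g)]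
-- ===== Notes on version B (the rewrite author's own statement) =====
-- stated objective: faster
-- what changed: B replaces A's walk-until-repeat loop with a number-theoretic closed form: the walk visits index t*(m-1) mod n at step t and its length is n // gcd(n, m-1), so B computes the gcd by Euclid's algorithm and emits the whole path as one comprehension, with no repeat detection at all.
import Mathlib
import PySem

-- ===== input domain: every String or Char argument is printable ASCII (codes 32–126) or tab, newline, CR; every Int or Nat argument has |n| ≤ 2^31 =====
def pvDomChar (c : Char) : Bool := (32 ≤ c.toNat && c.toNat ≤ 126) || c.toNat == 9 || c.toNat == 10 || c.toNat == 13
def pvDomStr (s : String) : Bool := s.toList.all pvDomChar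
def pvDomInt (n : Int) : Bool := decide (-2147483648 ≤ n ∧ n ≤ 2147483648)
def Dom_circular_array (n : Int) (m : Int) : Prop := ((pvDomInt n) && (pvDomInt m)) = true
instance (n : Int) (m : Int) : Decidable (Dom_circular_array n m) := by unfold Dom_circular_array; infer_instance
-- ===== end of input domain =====

-- B replaces A's walk-until-repeat loop by a closed form: the walk visits index
-- t*(m-1) mod n at step t and its length is n // gcd(n, m-1), so B computes gcd
-- by Euclid and emits the path as one comprehension — no repeat detection at all.

-- ===== PORT A =====
-- A's while loop: check array[current_index] (IndexError → none, outside Pre_),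
-- stop when its value is already in path, else append and step the index.
-- fuel = n.toNat + 1 is enough iterations for A's loop to reach its stop test (proved below).
def circA_loop (array : List Int) (n : Int) (m : Int) (ci : Int) (path : List Int) : Nat → List Int
  | 0 => path
  | fuel + 1 =>
    match PySem.List.pyGet? array ci with
    | none => path      -- IndexError in Python; unreachable under Pre_
    | some v =>
      if v ∈ path then path
      else circA_loop array n m (PySem.Int.mod (ci + m - 1) n) (path ++ [v]) fuel

def circular_array (n : Int) (m : Int) : List Int :=
  circA_loop (PySem.List.pyRange 1 (n+1) 1) n m 0 [] (n.toNat + 1)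

-- ===== PORT B =====
-- Source B's Euclid loop 'while r: g, r = r, g % r'; r strictly decreases while
-- nonnegative, so fuel = r.natAbs + 1 iterations suffice (proved below).
def pvGcdLoop (g r : Int) : Nat → Int
  | 0 => g
  | fuel + 1 => if r = 0 then g else pvGcdLoop r (PySem.Int.mod g r) fuel

def circular_array_alt (n : Int) (m : Int) : List Int :=
  let step := PySem.Int.mod (m - 1) n
  let g := pvGcdLoop n step (step.natAbs + 1)
  (PySem.List.pyRange 0 (PySem.Int.floordiv n g) 1).map
    (fun t => PySem.Int.mod (t * step) n + 1)

-- ===== PRECONDITION & SPEC =====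
-- Pre_ excludes exactly n ≤ 0, where A raises (IndexError on array[0] of an empty list).
def Pre_circular_array (n : Int) (m : Int) : Prop := 1 ≤ n
instance (n : Int) (m : Int) : Decidable (Pre_circular_array n m) := by unfold Pre_circular_array; infer_instance
def pvWitness_circular_array : Int × Int := (5, 2)

def Spec_circular_array (n : Int) (m : Int) (out : List Int) : Prop := out = circular_array_alt n m
instance (n : Int) (m : Int) (out : List Int) : Decidable (Spec_circular_array n m out) := by unfold Spec_circular_array; infer_instance

-- ===== CLAIM (what is proved, stated in full; the proofs are below) =====
def Claim_equal_circular_array : Prop := ∀ (n : Int) (m : Int), Dom_circular_array n m → Pre_circular_array n m → Spec_circular_array n m (circular_array n m)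

-- ===== LEMMAS AND PROOFS =====

-- the index orbit of A's walk: chain 0 = 0, chain (t+1) = (chain t + m - 1) % n
def pvChain (n : Int) (m : Int) : Nat → Int
  | 0 => 0
  | t + 1 => PySem.Int.mod (pvChain n m t + m - 1) n

-- closed form of the orbit: chain t = (t*S) % N in Nat, S = ((m-1) % n).toNat, N = n.toNat
theorem pvChain_closed (n m : Int) (N S : Nat) (hn : 1 ≤ n) (hN : (N : Int) = n)
    (hS : (S : Int) = (m - 1) % n) :
    ∀ t : Nat, pvChain n m t = ((t * S % N : Nat) : Int) := by
  intro t
  induction t with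
  | zero => simp [pvChain]
  | succ t ih =>
    have hn0 : (0 : Int) < n := by omega
    show PySem.Int.mod (pvChain n m t + m - 1) n = _
    rw [PySem.Int.mod_eq_emod_of_pos hn0, ih]
    have h1 : ((t * S % N : Nat) : Int) + m - 1 = ((t * S % N : Nat) : Int) + (m - 1) := by ring
    rw [h1, Int.add_emod, ← hS, ← hN]
    push_cast
    rw [Int.emod_emod_of_dvd _ dvd_rfl, Int.emod_add_emod]
    congr 1
    ring

-- number-theory core: N ∣ t*S ↔ (N / gcd N S) ∣ t
theorem pvDvd_iff (N S t : Nat) (hN : 0 < N) : N ∣ t * S ↔ N / Nat.gcd N S ∣ t := by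
  have hG0 : 0 < Nat.gcd N S := Nat.gcd_pos_of_pos_left _ hN
  have hcop : Nat.Coprime (N / Nat.gcd N S) (S / Nat.gcd N S) := Nat.coprime_div_gcd_div_gcd hG0
  have hNe : Nat.gcd N S * (N / Nat.gcd N S) = N := Nat.mul_div_cancel' (Nat.gcd_dvd_left N S)
  have hSe : Nat.gcd N S * (S / Nat.gcd N S) = S := Nat.mul_div_cancel' (Nat.gcd_dvd_right N S)
  constructor
  · intro h
    have h2 : Nat.gcd N S * (N / Nat.gcd N S) ∣ Nat.gcd N S * (t * (S / Nat.gcd N S)) := by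
      rw [hNe, show Nat.gcd N S * (t * (S / Nat.gcd N S)) = t * (Nat.gcd N S * (S / Nat.gcd N S)) by ring, hSe]
      exact h
    exact hcop.dvd_of_dvd_mul_right ((Nat.mul_dvd_mul_iff_left hG0).mp h2)
  · intro h
    have h3 : N / Nat.gcd N S ∣ t * (S / Nat.gcd N S) := h.mul_right _
    have h4 := (Nat.mul_dvd_mul_iff_left hG0).mpr h3
    rw [hNe, show Nat.gcd N S * (t * (S / Nat.gcd N S)) = t * (Nat.gcd N S * (S / Nat.gcd N S)) by ring, hSe] at h4
    exact h4

-- indexing A's array [1, ..., n]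
theorem pvArray_get (n i : Int) (h0 : 0 ≤ i) (h1 : i < n) :
    PySem.List.pyGet? (PySem.List.pyRange 1 (n+1) 1) i = some (i + 1) := by
  rw [PySem.List.pyGet?_of_nonneg _ h0, PySem.List.getElem?_pyRange_one]
  rw [if_pos (by omega)]
  congr 1
  omega

-- B's Euclid loop computes the gcd
theorem pvGcdLoop_eq : ∀ (fuel : Nat) (g r : Int), 0 < g → 0 ≤ r → r.natAbs < fuel →
    pvGcdLoop g r fuel = (Int.gcd g r : Int) := by
  intro fuel
  induction fuel with
  | zero => intro g r _ _ h; omega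
  | succ fuel ih =>
    intro g r hg hr hf
    by_cases h0 : r = 0
    · subst h0
      show (if (0:Int) = 0 then g else pvGcdLoop 0 (PySem.Int.mod g 0) fuel) = _
      rw [if_pos rfl, Int.gcd_zero_right]
      omega
    · have hr0 : (0 : Int) < r := by omega
      simp only [pvGcdLoop, if_neg h0]
      rw [PySem.Int.mod_eq_emod_of_pos hr0]
      have hlt : (g % r).natAbs < fuel := by
        have h1 := Int.emod_nonneg g (by omega : r ≠ 0)
        have h2 := Int.emod_lt_of_pos g hr0
        omega
      rw [ih r (g % r) hr0 (Int.emod_nonneg g (by omega)) hlt]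
      congr 1
      -- gcd r (g % r) = gcd g r, via Nat
      obtain ⟨G, rfl⟩ : ∃ G : Nat, (G : Int) = g := ⟨g.toNat, by omega⟩
      obtain ⟨R, rfl⟩ : ∃ R : Nat, (R : Int) = r := ⟨r.toNat, by omega⟩
      have : ((G : Int) % (R : Int)) = ((G % R : Nat) : Int) := by push_cast; ring
      rw [this]
      simp only [Int.gcd, Int.natAbs_natCast]
      rw [Nat.gcd_comm R (G % R), ← Nat.gcd_rec]
      exact Nat.gcd_comm R G

-- A's loop, from the aligned state after its first iteration, returns the whole orbit
theorem pvA_run (n m : Int) (N S K : Nat) (hn : 1 ≤ n) (hN : (N : Int) = n)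
    (hS : (S : Int) = (m - 1) % n) (hK : K = N / Nat.gcd N S) :
    ∀ (fuel j : Nat), 1 ≤ j → j ≤ K → K < j + fuel →
      circA_loop (PySem.List.pyRange 1 (n+1) 1) n m (pvChain n m j)
        ((List.range j).map (fun t => pvChain n m t + 1)) fuel
      = (List.range K).map (fun t => pvChain n m t + 1) := by
  have hN0 : 0 < N := by omega
  have hchain := pvChain_closed n m N S hn hN hS
  -- chain t = chain j (t ≤ j ≤ K, j < K or j = K) forces K ∣ j - t
  have hcoll : ∀ t j : Nat, t ≤ j → pvChain n m j = pvChain n m t → K ∣ (j - t) := by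
    intro t j htj heq
    rw [hchain, hchain] at heq
    have heq' : j * S % N = t * S % N := by exact_mod_cast heq
    have hmod : N ∣ j * S - t * S := by
      have := (Nat.modEq_iff_dvd' (Nat.mul_le_mul_right S htj)).mp heq'.symm
      exact this
    rw [← Nat.sub_mul] at hmod
    rw [hK]
    exact (pvDvd_iff N S (j - t) hN0).mp hmod
  intro fuel
  induction fuel with
  | zero => intro j _ _ _; omega
  | succ fuel ih =>
    intro j hj1 hjK hfuel
    have hr : 0 ≤ pvChain n m j ∧ pvChain n m j < n := by
      rw [hchain]
      constructor
      · positivity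
      · have := Nat.mod_lt (j * S) hN0
        omega
    have hget := pvArray_get n _ hr.1 hr.2
    simp only [circA_loop, hget]
    have hmem : (pvChain n m j + 1) ∈ (List.range j).map (fun t => pvChain n m t + 1)
        ↔ ∃ t, t < j ∧ pvChain n m t = pvChain n m j := by
      simp only [List.mem_map, List.mem_range]
      constructor
      · rintro ⟨t, ht, hteq⟩; exact ⟨t, ht, by omega⟩
      · rintro ⟨t, ht, hteq⟩; exact ⟨t, ht, by omega⟩
    by_cases hjlt : j < K
    · -- not yet back at the start: the new value is fresh
      have hfresh : ¬ (pvChain n m j + 1) ∈ (List.range j).map (fun t => pvChain n m t + 1) := by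
        rw [hmem]
        rintro ⟨t, ht, hteq⟩
        have hd := hcoll t j (by omega) hteq.symm
        have h1 : 1 ≤ j - t := by omega
        have h2 : j - t < K := by omega
        have := Nat.le_of_dvd (by omega) hd
        omega
      rw [if_neg hfresh]
      have happ : (List.range j).map (fun t => pvChain n m t + 1) ++ [pvChain n m j + 1]
          = (List.range (j+1)).map (fun t => pvChain n m t + 1) := by
        rw [List.range_succ, List.map_append]; rfl
      rw [happ]
      have hstep : PySem.Int.mod (pvChain n m j + m - 1) n = pvChain n m (j + 1) := rfl
      rw [hstep]
      exact ih (j + 1) (by omega) (by omega) (by omega)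
    · -- j = K: back at the start, the value 1 is already in the path
      have hjeq : j = K := by omega
      have hzero : pvChain n m K = 0 := by
        rw [hchain]
        have hdvd : N ∣ K * S := by
          refine (pvDvd_iff N S K hN0).mpr ?_
          rw [hK]
        simp [Nat.mod_eq_zero_of_dvd hdvd]
      have hmem' : (pvChain n m j + 1) ∈ (List.range j).map (fun t => pvChain n m t + 1) := by
        rw [hmem]
        exact ⟨0, by omega, by rw [hjeq, hzero]; rfl⟩
      rw [if_pos hmem', hjeq]

-- ===== VERDICT (by name: the statement is the Claim_ definition above) =====
theorem circular_array_spec : Claim_equal_circular_array := by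
  intro n m _ hpre
  have hn : (1 : Int) ≤ n := hpre
  have hn0 : (0 : Int) < n := by omega
  obtain ⟨N, hN⟩ : ∃ N : Nat, (N : Int) = n := ⟨n.toNat, by omega⟩
  have hN0 : 0 < N := by omega
  obtain ⟨S, hS⟩ : ∃ S : Nat, (S : Int) = (m - 1) % n :=
    ⟨((m - 1) % n).toNat, by have := Int.emod_nonneg (m - 1) (by omega : n ≠ 0); omega⟩
  have hG0 : 0 < Nat.gcd N S := Nat.gcd_pos_of_pos_left _ hN0
  set K := N / Nat.gcd N S with hK
  have hK1 : 1 ≤ K := Nat.div_pos (Nat.le_of_dvd hN0 (Nat.gcd_dvd_left N S)) hG0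
  have hKN : K ≤ N := Nat.div_le_self _ _
  have hchain := pvChain_closed n m N S hn hN hS
  unfold Spec_circular_array
  -- B side
  have hmodMN : PySem.Int.mod (m - 1) n = (S : Int) := by
    rw [PySem.Int.mod_eq_emod_of_pos hn0, hS]
  have hgcd : pvGcdLoop n (PySem.Int.mod (m - 1) n) ((PySem.Int.mod (m - 1) n).natAbs + 1)
      = ((Nat.gcd N S : Nat) : Int) := by
    rw [hmodMN, pvGcdLoop_eq _ n S hn0 (by positivity) (by simp)]
    congr 1
    rw [← hN]
    simp [Int.gcd]
  have hB : circular_array_alt n m = (List.range K).map (fun t => pvChain n m t + 1) := by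
    show (PySem.List.pyRange 0 (PySem.Int.floordiv n (pvGcdLoop n (PySem.Int.mod (m - 1) n) ((PySem.Int.mod (m - 1) n).natAbs + 1))) 1).map
        (fun t => PySem.Int.mod (t * PySem.Int.mod (m - 1) n) n + 1) = _
    rw [hgcd, hmodMN]
    have hdiv : PySem.Int.floordiv n ((Nat.gcd N S : Nat) : Int) = (K : Int) := by
      rw [PySem.Int.floordiv_eq_ediv_of_pos (by exact_mod_cast hG0), ← hN, hK]
      exact (Int.natCast_div N (Nat.gcd N S)).symm
    rw [hdiv, PySem.List.pyRange_one, List.map_map]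
    have hlen : ((K : Int) - 0).toNat = K := by omega
    rw [hlen]
    apply List.map_congr_left
    intro k hk
    simp only [Function.comp, zero_add]
    rw [hchain k, PySem.Int.mod_eq_emod_of_pos hn0, ← hN]
    push_cast
    ring
  have hA : circular_array n m = (List.range K).map (fun t => pvChain n m t + 1) := by
    unfold circular_array
    have hNtoNat : n.toNat = N := by omega
    rw [hNtoNat]
    have hget0 := pvArray_get n 0 (by omega) (by omega)
    simp only [circA_loop, hget0, List.nil_append]
    rw [if_neg (by simp)]
    have h1 : PySem.Int.mod (0 + m - 1) n = pvChain n m 1 := rfl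
    have h2 : [(0:Int) + 1] = (List.range 1).map (fun t => pvChain n m t + 1) := by
      simp [pvChain]
    rw [h1, h2]
    exact pvA_run n m N S K hn hN hS hK N 1 (le_refl 1) hK1 (by omega)
  rw [hA, hB]
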